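-- pv_equiv track=rewrite | github.com/beHoang3tui/Python_Library | b2/b1.py | timChuoi
-- ===== SOURCE A (Python) =====
-- def ktra(str1, str2):
--     m = len(str1)
--     n = len(str2)
--
--     j = 0
--     i = 0
--     while (i < n and j < m):
--         if (str1[j] == str2[i]):
--             j += 1
--         i += 1
--
--     return (j == m)
--
-- def timChuoi(d, str1):
--     str = ""
--     length = 0
--
--     for word in d:
--         if (length < len(word) and ktra(word, str1)):
--             str = word
--             length = len(word)
--
--     return str
-- ===== SOURCE B (Python) =====
-- def timChuoi(d, str1):
--     def is_subseq(word):
--         it = iter(str1)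
--         return all(ch in it for ch in word)
--     for word in sorted(d, key=len, reverse=True):
--         if is_subseq(word):
--             return word
--     return ""
-- ===== Notes on version B (the rewrite author's own statement) =====
-- stated objective: alternative
-- what changed: Replaces A's single running-max scan (tracking best word and its length) by a sort-first strategy: stable-sort the words by length descending, then return the first word in that order that is a subsequence of str1 (checked with the iterator-consumption idiom) -- the stable sort makes the first hit exactly A's first-of-max winner.
import Mathlib
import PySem

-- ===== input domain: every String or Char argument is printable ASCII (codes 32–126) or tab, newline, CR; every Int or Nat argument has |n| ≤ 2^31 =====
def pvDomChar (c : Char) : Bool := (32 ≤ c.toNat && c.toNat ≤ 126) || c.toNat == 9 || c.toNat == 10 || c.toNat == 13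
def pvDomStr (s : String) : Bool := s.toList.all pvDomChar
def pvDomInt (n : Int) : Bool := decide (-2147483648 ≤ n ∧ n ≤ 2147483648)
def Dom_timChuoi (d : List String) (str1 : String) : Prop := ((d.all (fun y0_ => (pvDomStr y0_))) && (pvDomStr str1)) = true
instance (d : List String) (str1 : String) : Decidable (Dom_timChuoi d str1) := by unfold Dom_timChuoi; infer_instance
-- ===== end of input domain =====

-- B stable-sorts the words by length descending and returns the first word that is a
-- subsequence of str1, instead of A's running-max scan (objective: alternative).


-- ===== PORT A =====
-- the while loop of ktra: i runs over str2 (the remaining t), j over str1 (the remaining w)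
def ktraLoop (w t : List Char) : Bool :=
  match w, t with
  | w, [] => w.isEmpty            -- loop exits with i = n; return j == m
  | [], _ :: _ => true            -- loop exits with j = m
  | x :: w', c :: t' => if x == c then ktraLoop w' t' else ktraLoop (x :: w') t'

def ktra (str1 str2 : String) : Bool := ktraLoop str1.toList str2.toList

def timChuoi (d : List String) (str1 : String) : String :=
  (d.foldl
    (fun (acc : String × Int) word =>
      if acc.2 < PySem.Str.len word ∧ ktra word str1 then (word, PySem.Str.len word) else acc)
    ("", 0)).1

-- ===== PORT B =====
-- 'ch in it': consume the iterator up to (and past) the first occurrence of ch; none = exhausted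
def pvConsume (c : Char) (t : List Char) : Option (List Char) :=
  match t with
  | [] => none
  | x :: t' => if x == c then some t' else pvConsume c t'

-- all(ch in it for ch in word)
def pvIsSubseqLoop (w t : List Char) : Bool :=
  match w with
  | [] => true
  | c :: w' =>
    match pvConsume c t with
    | none => false
    | some t' => pvIsSubseqLoop w' t'

def pvIsSubseq (word str1 : String) : Bool := pvIsSubseqLoop word.toList str1.toList

-- the 'for word in …: if is_subseq(word): return word' loop; falls through to ""
def pvFirst (str1 : String) : List String → String
  | [] => ""
  | w :: ws => if pvIsSubseq w str1 then w else pvFirst str1 ws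

def timChuoi_alt (d : List String) (str1 : String) : String :=
  pvFirst str1 (PySem.List.sorted d (fun w => PySem.Str.len w) true)

-- ===== PRECONDITION & SPEC =====
def Spec_timChuoi (d : List String) (str1 : String) (out : String) : Prop := out = timChuoi_alt d str1
instance (d : List String) (str1 : String) (out : String) : Decidable (Spec_timChuoi d str1 out) := by unfold Spec_timChuoi; infer_instance

-- ===== CLAIM (what is proved, stated in full; the proofs are below) =====
def Claim_equal_timChuoi : Prop := ∀ (d : List String) (str1 : String), Dom_timChuoi d str1 → Spec_timChuoi d str1 (timChuoi d str1)

-- ===== LEMMAS AND PROOFS =====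

-- A's two-pointer check equals B's iterator-consumption check
theorem ktraLoop_eq_pvIsSubseqLoop (t w : List Char) : ktraLoop w t = pvIsSubseqLoop w t := by
  induction t generalizing w with
  | nil =>
    cases w with
    | nil => simp [ktraLoop, pvIsSubseqLoop]
    | cons x w' => simp [ktraLoop, pvIsSubseqLoop, pvConsume]
  | cons c t' ih =>
    cases w with
    | nil => simp [ktraLoop, pvIsSubseqLoop]
    | cons x w' =>
      by_cases h : x = c
      · simp [ktraLoop, pvIsSubseqLoop, pvConsume, h, ih]
      · have h' : ¬ c = x := fun hc => h hc.symm
        simp only [ktraLoop, pvIsSubseqLoop, pvConsume, beq_iff_eq, if_neg h, if_neg h']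
        rw [ih]
        cases hc : pvConsume x t' <;> simp [pvIsSubseqLoop, hc]

-- the words A's running max may actually pick up: passers of positive length
def pvPred (str1 : String) (w : String) : Bool :=
  pvIsSubseq w str1 && decide (0 < PySem.Str.len w)

-- A's fold state as a function of the first positive passer
def pvOut : Option String → String × Int
  | none => ("", 0)
  | some w => (w, PySem.Str.len w)

theorem len_nonneg (s : String) : 0 ≤ PySem.Str.len s := by
  simp [PySem.Str.len_eq]

theorem len_le_zero_iff (s : String) : PySem.Str.len s ≤ 0 ↔ s = "" := by
  constructor
  · intro h
    have : s.toList.length = 0 := by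
      have := PySem.Str.len_eq s
      omega
    have := List.eq_nil_of_length_eq_zero this
    cases s; simp_all [String.toList]
  · intro h; subst h; simp [PySem.Str.len_eq]

theorem pvOut_snd_nonneg (o : Option String) : 0 ≤ (pvOut o).2 := by
  cases o with
  | none => simp [pvOut]
  | some w => exact len_nonneg w

-- insertion splits the list at the first element the new one goes before
theorem insertBy_split {α : Type} (bef : α → α → Bool) (x : α) (s : List α) :
    PySem.List.insertBy bef x s
      = s.takeWhile (fun y => !bef x y) ++ x :: s.dropWhile (fun y => !bef x y) := by
  induction s with
  | nil => rfl
  | cons y ys ih =>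
    by_cases h : bef x y = true
    · simp [PySem.List.insertBy, h]
    · simp only [Bool.not_eq_true] at h
      simp [PySem.List.insertBy, h, ih]

-- the heart: inserting x into a descending list mirrors A's running-max step
theorem step_insert (str1 x : String) (s : List String)
    (hs : s.Pairwise (fun a b => PySem.Str.len b ≤ PySem.Str.len a)) :
    pvOut ((PySem.List.insertBy
        (fun a b => decide (PySem.Str.len b < PySem.Str.len a)) x s).find? (pvPred str1))
      = (if (pvOut (s.find? (pvPred str1))).2 < PySem.Str.len x ∧ ktra x str1
          then (x, PySem.Str.len x) else pvOut (s.find? (pvPred str1))) := by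
  have hk : ktra x str1 = pvIsSubseq x str1 := ktraLoop_eq_pvIsSubseqLoop _ _
  set q : String → Bool := fun y => !(decide (PySem.Str.len y < PySem.Str.len x)) with hq
  have hsplit := insertBy_split (fun a b => decide (PySem.Str.len b < PySem.Str.len a)) x s
  have hpre : ∀ y ∈ s.takeWhile q, PySem.Str.len x ≤ PySem.Str.len y := by
    intro y hy
    have := List.mem_takeWhile_imp hy
    simp [hq, PySem.Str.len_eq] at this
    simp [PySem.Str.len_eq]
    omega
  have hsuf : ∀ y ∈ s.dropWhile q, PySem.Str.len y < PySem.Str.len x := by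
    intro y hy
    cases hd : s.dropWhile q with
    | nil => simp [hd] at hy
    | cons h t =>
      have hhead := List.head?_dropWhile_not q s
      rw [hd] at hhead
      simp [hq] at hhead
      have hpw : (s.dropWhile q).Pairwise (fun a b => PySem.Str.len b ≤ PySem.Str.len a) :=
        List.Pairwise.sublist (List.dropWhile_sublist q) hs
      rw [hd] at hpw
      rw [hd] at hy
      rcases List.mem_cons.1 hy with rfl | hyt
      · simp [PySem.Str.len_eq]; omega
      · have := (List.pairwise_cons.1 hpw).1 y hyt
        simp [PySem.Str.len_eq] at this ⊢
        omega
  rw [hsplit, List.find?_append]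
  conv_rhs => rw [show s = s.takeWhile q ++ s.dropWhile q from (List.takeWhile_append_dropWhile).symm]
  rw [List.find?_append]
  by_cases hpx : pvPred str1 x = true
  · have hpx' := hpx
    simp [pvPred, PySem.Str.len_eq] at hpx'
    have hsub : pvIsSubseq x str1 = true := hpx'.1
    have hlen : 0 < PySem.Str.len x := by
      simp [PySem.Str.len_eq]; omega
    rw [List.find?_cons_of_pos hpx]
    cases hfp : (s.takeWhile q).find? (pvPred str1) with
    | some w =>
      have hwmem : w ∈ s.takeWhile q := List.mem_of_find?_eq_some hfp
      have hwge := hpre w hwmem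
      simp only [Option.some_or]
      rw [if_neg]
      rintro ⟨hlt, -⟩
      simp only [pvOut] at hlt
      omega
    | none =>
      simp only [Option.none_or]
      rw [if_pos]
      · rfl
      refine ⟨?_, by rw [hk, hsub]⟩
      cases hfs : (s.dropWhile q).find? (pvPred str1) with
      | none => simpa [pvOut] using hlen
      | some w =>
        have hwmem : w ∈ s.dropWhile q := List.mem_of_find?_eq_some hfs
        have := hsuf w hwmem
        simpa [pvOut] using this
  · rw [List.find?_cons_of_neg hpx]
    rw [if_neg]
    intro ⟨hlt, hkt⟩
    rw [hk] at hkt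
    have h0 := pvOut_snd_nonneg (((s.takeWhile q).find? (pvPred str1)).or ((s.dropWhile q).find? (pvPred str1)))
    simp [pvPred, hkt] at hpx
    subst hpx
    rw [PySem.Str.len_eq] at hlt
    simp at hlt
    omega

-- A's whole fold computes pvOut of the first positive passer of the sorted list
theorem fold_eq_sorted (str1 : String) (d : List String) :
    d.foldl
      (fun (acc : String × Int) word =>
        if acc.2 < PySem.Str.len word ∧ ktra word str1 then (word, PySem.Str.len word) else acc)
      ("", 0)
    = pvOut ((PySem.List.sorted d (fun w => PySem.Str.len w) true).find? (pvPred str1)) := by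
  induction d using List.reverseRecOn with
  | nil => rfl
  | append_singleton l x ih =>
    rw [List.foldl_append]
    simp only [List.foldl_cons, List.foldl_nil]
    rw [ih]
    have hins : PySem.List.sorted (l ++ [x]) (fun w => PySem.Str.len w) true
        = PySem.List.insertBy (fun a b => decide (PySem.Str.len b < PySem.Str.len a)) x
            (PySem.List.sorted l (fun w => PySem.Str.len w) true) := by
      rw [PySem.List.sorted_rev_eq_foldl_insertBy, PySem.List.sorted_rev_eq_foldl_insertBy,
        List.foldl_append, List.foldl_cons, List.foldl_nil]
    rw [hins, step_insert str1 x _ (PySem.List.sorted_pairwise_rev l (fun w => PySem.Str.len w))]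

-- B's early-exit loop is find? of the plain subsequence test
theorem pvFirst_eq_find? (str1 : String) (s : List String) :
    pvFirst str1 s = (s.find? (fun w => pvIsSubseq w str1)).getD "" := by
  induction s with
  | nil => rfl
  | cons w ws ih =>
    by_cases h : pvIsSubseq w str1 = true
    · simp [pvFirst, h, List.find?_cons_of_pos]
    · simp only [Bool.not_eq_true] at h
      simp [pvFirst, h, List.find?_cons_of_neg, ih]

-- on a length-descending list, the first passer and the first positive passer coincide up to ""
theorem find?_pred_eq (str1 : String) (s : List String)
    (hs : s.Pairwise (fun a b => PySem.Str.len b ≤ PySem.Str.len a)) :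
    (s.find? (pvPred str1)).getD "" = (s.find? (fun w => pvIsSubseq w str1)).getD "" := by
  induction s with
  | nil => rfl
  | cons y t ih =>
    obtain ⟨hy, ht⟩ := List.pairwise_cons.1 hs
    by_cases hp : pvIsSubseq y str1 = true
    · by_cases hl : 0 < PySem.Str.len y
      · have hl2 : 0 < y.length := by rw [PySem.Str.len_eq] at hl; exact_mod_cast hl
        rw [List.find?_cons_of_pos (by simp [pvPred, hp, hl2]),
          List.find?_cons_of_pos (p := fun w => pvIsSubseq w str1) (by simp [hp])]
      · have hy0 : y = "" := (len_le_zero_iff y).1 (by omega)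
        rw [List.find?_cons_of_neg (by subst hy0; simp [pvPred, PySem.Str.len_eq]),
          List.find?_cons_of_pos (p := fun w => pvIsSubseq w str1) (by simp [hp])]
        have hnone : t.find? (pvPred str1) = none := by
          rw [List.find?_eq_none]
          intro w hw
          have h1 := hy w hw
          rw [PySem.Str.len_eq, PySem.Str.len_eq] at h1
          rw [PySem.Str.len_eq] at hl
          simp [pvPred]
          intro _
          exact (len_le_zero_iff w).1 (by rw [PySem.Str.len_eq]; omega)
        rw [hnone]
        simp [hy0]
    · simp only [Bool.not_eq_true] at hp
      rw [List.find?_cons_of_neg (by simp [pvPred, hp]),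
        List.find?_cons_of_neg (p := fun w => pvIsSubseq w str1) (by simp [hp])]
      exact ih ht

theorem pvOut_fst (o : Option String) : (pvOut o).1 = o.getD "" := by
  cases o <;> rfl

-- ===== VERDICT (by name: the statement is the Claim_ definition above) =====
theorem timChuoi_spec : Claim_equal_timChuoi := by
  intro d str1 _
  unfold Spec_timChuoi timChuoi timChuoi_alt
  rw [fold_eq_sorted, pvOut_fst, pvFirst_eq_find?,
    find?_pred_eq str1 _ (PySem.List.sorted_pairwise_rev d (fun w => PySem.Str.len w))]
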